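-- pv_equiv track=rewrite | github.com/MingMingLiu0112/Futures_Trading | pta_analysis/scripts/chan_xd_v29.py | build_bi_strict
-- ===== SOURCE A (Python) =====
-- def build_bi_strict(fen_list, klist):
--     """
--     严格缠论笔构建（去掉ATR阈值）
--     规则：
--     - 底分型 + 顶分型 = 上行笔（up）
--     - 顶分型 + 底分型 = 下行笔（down）
--     - 标准笔：分型间至少4根K线
--     返回笔列表 [(direction, start_idx, end_idx, start_price, end_price), ...]
--     """
--     if len(fen_list) < 2:
--         return []
--
--     result = []
--     i = 0
--
--     while i < len(fen_list) - 1: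
--         t_start, idx_start, price_start = fen_list[i]
--
--         # 确定笔方向
--         if t_start == 'bottom':
--             direction = 'up'
--             target_type = 'top'
--         else:
--             direction = 'down'
--             target_type = 'bottom'
--
--         # 寻找下一个目标分型
--         j = i + 1
--         while j < len(fen_list):
--             t_check, idx_check, price_check = fen_list[j]
--
--             if t_check == target_type:
--                 # 检查K线数量
--                 k_count = idx_check - idx_start + 1
--                 if k_count >= 4:
--                     # 有效笔
--                     result.append((direction, idx_start, idx_check, price_start, price_check))
--                     i = j
--                     break
--                 else:
--                     # K线数量不足，继续寻找
--                     j += 1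
--             else:
--                 j += 1
--         else:
--             # 没有找到合适的目标分型
--             i += 1
--
--     return result
-- ===== SOURCE B (Python) =====
-- def build_bi_strict(fen_list, klist):
--     """Same strokes as A, but with per-type position index arrays: the inner
--     scan only visits fenxings of the target type, entered via binary search
--     on position, instead of rescanning the whole tail for each start."""
--     n = len(fen_list)
--     if n < 2:
--         return []
--     bottoms = [j for j, f in enumerate(fen_list) if f[0] == 'bottom']
--     tops = [j for j, f in enumerate(fen_list) if f[0] == 'top']
--     result = []
--     i = 0
--     while i < n - 1:
--         t0, idx0, p0 = fen_list[i]
--         if t0 == 'bottom':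
--             direction, arr = 'up', tops
--         else:
--             direction, arr = 'down', bottoms
--         # binary search: first k with arr[k] > i
--         lo, hi = 0, len(arr)
--         while lo < hi:
--             mid = (lo + hi) // 2
--             if arr[mid] <= i:
--                 lo = mid + 1
--             else:
--                 hi = mid
--         # scan target-type positions only, first with enough k-lines
--         found = -1
--         k = lo
--         while k < len(arr):
--             j = arr[k]
--             if fen_list[j][1] >= idx0 + 3:
--                 found = j
--                 break
--             k += 1
--         if found >= 0:
--             _, idxf, pf = fen_list[found]
--             result.append((direction, idx0, idxf, p0, pf))
--             i = found
--         else: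
--             i += 1
--     return result
-- ===== Notes on version B (the rewrite author's own statement) =====
-- stated objective: faster
-- what changed: B precomputes per-type position arrays once and, for each stroke start, binary-searches the entry point and scans only fenxings of the target type, instead of A's inner rescan of the whole tail mixing both types.
import Mathlib
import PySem

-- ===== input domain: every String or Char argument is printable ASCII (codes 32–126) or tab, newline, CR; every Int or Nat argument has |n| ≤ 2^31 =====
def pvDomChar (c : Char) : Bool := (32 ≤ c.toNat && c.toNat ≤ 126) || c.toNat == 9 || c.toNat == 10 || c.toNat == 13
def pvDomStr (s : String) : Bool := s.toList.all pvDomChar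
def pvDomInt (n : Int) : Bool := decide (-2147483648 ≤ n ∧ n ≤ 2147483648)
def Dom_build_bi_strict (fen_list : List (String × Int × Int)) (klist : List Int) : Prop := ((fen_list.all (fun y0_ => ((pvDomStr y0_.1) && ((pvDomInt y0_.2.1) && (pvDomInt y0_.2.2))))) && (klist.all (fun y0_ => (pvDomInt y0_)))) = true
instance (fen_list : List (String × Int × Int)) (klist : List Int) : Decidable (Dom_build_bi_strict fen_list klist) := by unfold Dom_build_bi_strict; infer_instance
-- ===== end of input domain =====

-- B replaces A's inner rescan of the whole tail (both fenxing types mixed) by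
-- per-type position arrays entered via a hand-written binary search (measured
-- faster by a constant factor; worst-case bound unchanged). Both versions
-- ignore `klist`; neither mutates its arguments. Each Lean loop carries a `fuel : Nat` argument as a
-- pure totality guard (always called with enough fuel; it changes no result).

-- ===== PORT A =====
-- inner `while j < len(fen_list)` scan of A, step for step
def aFind (fen : List (String × Int × Int)) (target : String) (idx0 : Int) (j : Nat) (fuel : Nat) : Option Nat :=
  match fuel with
  | 0 => none
  | fuel + 1 =>
    if j < fen.length then
      if (fen.getD j ("", 0, 0)).1 == target then
        if (fen.getD j ("", 0, 0)).2.1 - idx0 + 1 ≥ 4 then some j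
        else aFind fen target idx0 (j + 1) fuel
      else aFind fen target idx0 (j + 1) fuel
    else none

-- outer `while i < len(fen_list) - 1` loop of A
def aLoop (fen : List (String × Int × Int)) (i : Nat) (acc : List (String × Int × Int × Int × Int)) (fuel : Nat) :
    List (String × Int × Int × Int × Int) :=
  match fuel with
  | 0 => acc
  | fuel + 1 =>
    if i + 1 < fen.length then
      match aFind fen (if (fen.getD i ("", 0, 0)).1 == "bottom" then "top" else "bottom")
          (fen.getD i ("", 0, 0)).2.1 (i + 1) fen.length with
      | some j =>
          aLoop fen j (acc ++ [((if (fen.getD i ("", 0, 0)).1 == "bottom" then "up" else "down"),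
            (fen.getD i ("", 0, 0)).2.1, (fen.getD j ("", 0, 0)).2.1,
            (fen.getD i ("", 0, 0)).2.2, (fen.getD j ("", 0, 0)).2.2)]) fuel
      | none => aLoop fen (i + 1) acc fuel
    else acc

def build_bi_strict (fen_list : List (String × Int × Int)) (klist : List Int) :
    List (String × Int × Int × Int × Int) :=
  if fen_list.length < 2 then [] else aLoop fen_list 0 [] fen_list.length

-- ===== PORT B =====
-- positions of the fenxings of one type (Source B's comprehensions over enumerate)
def typePositions (fen : List (String × Int × Int)) (t : String) : List Nat :=
  (List.range fen.length).filter (fun j => (fen.getD j ("", 0, 0)).1 == t)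

-- Source B's hand-written binary search: first k in [lo,hi) with arr[k] > i
def bisectGt (arr : List Nat) (i : Nat) (lo hi : Nat) (fuel : Nat) : Nat :=
  match fuel with
  | 0 => lo
  | fuel + 1 =>
    if lo < hi then
      if arr.getD ((lo + hi) / 2) 0 ≤ i then bisectGt arr i ((lo + hi) / 2 + 1) hi fuel
      else bisectGt arr i lo ((lo + hi) / 2) fuel
    else lo

-- Source B's `while k < len(arr)` scan within the target-type positions
def bScan (fen : List (String × Int × Int)) (arr : List Nat) (v : Int) (k : Nat) (fuel : Nat) : Option Nat :=
  match fuel with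
  | 0 => none
  | fuel + 1 =>
    if k < arr.length then
      if (fen.getD (arr.getD k 0) ("", 0, 0)).2.1 ≥ v then some (arr.getD k 0)
      else bScan fen arr v (k + 1) fuel
    else none

-- outer loop of Source B (the two precomputed position arrays appear inline)
def bLoop (fen : List (String × Int × Int)) (i : Nat) (acc : List (String × Int × Int × Int × Int)) (fuel : Nat) :
    List (String × Int × Int × Int × Int) :=
  match fuel with
  | 0 => acc
  | fuel + 1 =>
    if i + 1 < fen.length then
      match bScan fen
          (if (fen.getD i ("", 0, 0)).1 == "bottom" then typePositions fen "top" else typePositions fen "bottom")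
          ((fen.getD i ("", 0, 0)).2.1 + 3)
          (bisectGt (if (fen.getD i ("", 0, 0)).1 == "bottom" then typePositions fen "top" else typePositions fen "bottom") i 0
            (if (fen.getD i ("", 0, 0)).1 == "bottom" then typePositions fen "top" else typePositions fen "bottom").length
            (if (fen.getD i ("", 0, 0)).1 == "bottom" then typePositions fen "top" else typePositions fen "bottom").length)
          (if (fen.getD i ("", 0, 0)).1 == "bottom" then typePositions fen "top" else typePositions fen "bottom").length with
      | some j =>
          bLoop fen j (acc ++ [((if (fen.getD i ("", 0, 0)).1 == "bottom" then "up" else "down"),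
            (fen.getD i ("", 0, 0)).2.1, (fen.getD j ("", 0, 0)).2.1,
            (fen.getD i ("", 0, 0)).2.2, (fen.getD j ("", 0, 0)).2.2)]) fuel
      | none => bLoop fen (i + 1) acc fuel
    else acc

def build_bi_strict_alt (fen_list : List (String × Int × Int)) (klist : List Int) :
    List (String × Int × Int × Int × Int) :=
  if fen_list.length < 2 then [] else bLoop fen_list 0 [] fen_list.length

-- ===== PRECONDITION & SPEC =====
def Spec_build_bi_strict (fen_list : List (String × Int × Int)) (klist : List Int) (out : List (String × Int × Int × Int × Int)) : Prop := out = build_bi_strict_alt fen_list klist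
instance (fen_list : List (String × Int × Int)) (klist : List Int) (out : List (String × Int × Int × Int × Int)) : Decidable (Spec_build_bi_strict fen_list klist out) := by unfold Spec_build_bi_strict; infer_instance

-- ===== CLAIM (what is proved, stated in full; the proofs are below) =====
def Claim_equal_build_bi_strict : Prop := ∀ (fen_list : List (String × Int × Int)) (klist : List Int), Dom_build_bi_strict fen_list klist → Spec_build_bi_strict fen_list klist (build_bi_strict fen_list klist)

-- ===== LEMMAS AND PROOFS =====
theorem find?_filter' {α : Type} (l : List α) (p q : α → Bool) :
    (l.filter q).find? p = l.find? (fun x => q x && p x) := by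
  induction l with
  | nil => rfl
  | cons a t ih =>
    by_cases h : q a
    · simp only [List.filter_cons, h, if_pos, List.find?_cons, Bool.true_and]
      cases hp : p a <;> simp [ih]
    · simp [h, ih]

theorem find?_congr' {α : Type} (l : List α) (p q : α → Bool) (h : ∀ x ∈ l, p x = q x) :
    l.find? p = l.find? q := by
  induction l with
  | nil => rfl
  | cons a t ih =>
    rw [List.find?_cons, List.find?_cons, h a (List.mem_cons_self)]
    split
    · rfl
    · exact ih (fun x hx => h x (List.mem_cons_of_mem a hx))

theorem find?_drop_of_take {α : Type} (l : List α) (p : α → Bool) (k : Nat)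
    (h : ∀ x ∈ l.take k, p x = false) : l.find? p = (l.drop k).find? p := by
  conv_lhs => rw [← List.take_append_drop k l]
  rw [List.find?_append, List.find?_eq_none.mpr (fun x hx => by simp [h x hx]), Option.none_or]

theorem mem_drop_range (n k x : Nat) (h : x ∈ (List.range n).drop k) : k ≤ x := by
  rw [List.range_eq_range', List.drop_range'] at h
  simp only [Nat.zero_add, Nat.mul_one] at h
  exact (List.mem_range'_1.mp h).1

theorem mem_take_range (n k x : Nat) (h : x ∈ (List.range n).take k) : x < k := by
  rw [List.take_range] at h
  have := List.mem_range.mp h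
  omega

theorem sorted_typePositions (fen : List (String × Int × Int)) (t : String) :
    (typePositions fen t).Pairwise (· < ·) :=
  List.pairwise_lt_range.filter _

theorem aFind_eq_find? (fen : List (String × Int × Int)) (t : String) (v : Int) :
    ∀ (fuel j : Nat), fen.length - j ≤ fuel →
    aFind fen t v j fuel = ((List.range fen.length).drop j).find?
      (fun j => ((fen.getD j ("", 0, 0)).1 == t) && decide ((fen.getD j ("", 0, 0)).2.1 - v + 1 ≥ 4)) := by
  intro fuel
  induction fuel with
  | zero =>
    intro j hf
    rw [List.drop_eq_nil_iff.mpr (by simp; omega)]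
    rfl
  | succ fuel ih =>
    intro j hf
    rw [aFind]
    by_cases hlt : j < fen.length
    · rw [if_pos hlt]
      rw [List.drop_eq_getElem_cons (by simpa using hlt), List.find?_cons]
      by_cases htm : ((fen.getD j ("", 0, 0)).1 == t) = true
      · by_cases hc : (fen.getD j ("", 0, 0)).2.1 - v + 1 ≥ 4
        · simp_all [List.getD, beq_iff_eq]
        · rw [if_pos htm, if_neg hc, ih (j + 1) (by omega)]
          simp_all [List.getD, beq_iff_eq]
          rw [decide_eq_false (by omega)]
      · rw [if_neg htm, ih (j + 1) (by omega)]
        simp only [List.getElem_range]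
        rw [Bool.not_eq_true] at htm
        rw [htm, Bool.false_and]
    · rw [if_neg hlt, List.drop_eq_nil_iff.mpr (by simp; omega)]
      rfl

theorem bScan_eq_find? (fen : List (String × Int × Int)) (arr : List Nat) (v : Int) :
    ∀ (fuel k : Nat), arr.length - k ≤ fuel →
    bScan fen arr v k fuel = (arr.drop k).find? (fun j => decide ((fen.getD j ("", 0, 0)).2.1 ≥ v)) := by
  intro fuel
  induction fuel with
  | zero =>
    intro k hf
    rw [List.drop_eq_nil_iff.mpr (by omega)]
    rfl
  | succ fuel ih =>
    intro k hf
    rw [bScan]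
    by_cases hlt : k < arr.length
    · rw [if_pos hlt, List.drop_eq_getElem_cons hlt, List.find?_cons]
      by_cases hc : (fen.getD (arr.getD k 0) ("", 0, 0)).2.1 ≥ v
      · rw [if_pos hc]
        rw [List.getD_eq_getElem _ _ hlt] at hc ⊢
        rw [decide_eq_true hc]
      · rw [if_neg hc]
        rw [List.getD_eq_getElem _ _ hlt] at hc
        rw [decide_eq_false (by omega), ih (k + 1) (by omega)]
    · rw [if_neg hlt, List.drop_eq_nil_iff.mpr (by omega)]
      rfl

theorem bisectGt_bounds (arr : List Nat) (i : Nat) (hs : arr.Pairwise (· < ·)) :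
    ∀ (fuel lo hi : Nat), hi - lo ≤ fuel → lo ≤ hi → hi ≤ arr.length →
    (∀ m, m < lo → arr.getD m 0 ≤ i) →
    (∀ m, hi ≤ m → m < arr.length → i < arr.getD m 0) →
    (∀ m, m < bisectGt arr i lo hi fuel → arr.getD m 0 ≤ i) ∧
    (∀ m, bisectGt arr i lo hi fuel ≤ m → m < arr.length → i < arr.getD m 0) := by
  have mono : ∀ a b, a ≤ b → b < arr.length → arr.getD a 0 ≤ arr.getD b 0 := by
    intro a b hab hb
    rw [List.getD_eq_getElem _ _ (by omega), List.getD_eq_getElem _ _ hb]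
    rcases Nat.lt_or_ge a b with h | h
    · exact Nat.le_of_lt (List.pairwise_iff_getElem.mp hs a b (by omega) hb h)
    · have : a = b := by omega
      subst this; exact Nat.le_refl _
  intro fuel
  induction fuel with
  | zero =>
    intro lo hi hf hlohi hhi hlow hup
    have : lo = hi := by omega
    subst this
    rw [bisectGt]
    exact ⟨hlow, fun m hm hmlen => hup m (by omega) hmlen⟩
  | succ fuel ih =>
    intro lo hi hf hlohi hhi hlow hup
    rw [bisectGt]
    by_cases hlt : lo < hi
    · rw [if_pos hlt]
      by_cases hle : arr.getD ((lo + hi) / 2) 0 ≤ i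
      · rw [if_pos hle]
        have hmid : (lo + hi) / 2 < arr.length := by omega
        refine ih ((lo + hi) / 2 + 1) hi (by omega) (by omega) hhi ?_ hup
        intro m hm
        have h2 := mono m ((lo + hi) / 2) (by omega) hmid
        omega
      · rw [if_neg hle]
        refine ih lo ((lo + hi) / 2) (by omega) (by omega) (by omega) hlow ?_
        intro m hm hmlen
        have h2 := mono ((lo + hi) / 2) m hm hmlen
        omega
    · rw [if_neg hlt]
      exact ⟨hlow, fun m hm hmlen => hup m (by omega) hmlen⟩

theorem bisectGt_le (arr : List Nat) (i : Nat) :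
    ∀ (fuel lo hi : Nat), lo ≤ hi → bisectGt arr i lo hi fuel ≤ hi := by
  intro fuel
  induction fuel with
  | zero => intro lo hi h; rw [bisectGt]; omega
  | succ fuel ih =>
    intro lo hi h
    rw [bisectGt]
    by_cases hlt : lo < hi
    · rw [if_pos hlt]
      by_cases hle : arr.getD ((lo + hi) / 2) 0 ≤ i
      · rw [if_pos hle]; exact ih _ _ (by omega)
      · rw [if_neg hle]; exact le_trans (ih _ _ (by omega)) (by omega)
    · rw [if_neg hlt]; omega

theorem drop_bisectGt_eq_filter (arr : List Nat) (i : Nat) (hs : arr.Pairwise (· < ·)) :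
    arr.drop (bisectGt arr i 0 arr.length arr.length) = arr.filter (fun j => decide (i < j)) := by
  obtain ⟨hlow, hup⟩ := bisectGt_bounds arr i hs arr.length 0 arr.length (by omega) (Nat.zero_le _)
    (Nat.le_refl _) (by omega) (by omega)
  have hr : bisectGt arr i 0 arr.length arr.length ≤ arr.length :=
    bisectGt_le arr i arr.length 0 arr.length (Nat.zero_le _)
  conv_rhs => rw [← List.take_append_drop (bisectGt arr i 0 arr.length arr.length) arr]
  rw [List.filter_append]
  have h1 : (arr.take (bisectGt arr i 0 arr.length arr.length)).filter (fun j => decide (i < j)) = [] := by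
    rw [List.filter_eq_nil_iff]
    intro x hx
    obtain ⟨m, hm, hget⟩ := List.mem_iff_getElem.mp hx
    have hmlt : m < bisectGt arr i 0 arr.length arr.length := by
      have := hm; simp [List.length_take] at this; omega
    have hmlen : m < arr.length := by
      have := hm; simp [List.length_take] at this; omega
    have := hlow m hmlt
    rw [List.getD_eq_getElem _ _ hmlen] at this
    rw [List.getElem_take] at hget
    simp only [decide_eq_true_eq]
    omega
  have h2 : (arr.drop (bisectGt arr i 0 arr.length arr.length)).filter (fun j => decide (i < j)) =
      arr.drop (bisectGt arr i 0 arr.length arr.length) := by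
    rw [List.filter_eq_self]
    intro x hx
    obtain ⟨m, hm, hget⟩ := List.mem_iff_getElem.mp hx
    have hmlen : bisectGt arr i 0 arr.length arr.length + m < arr.length := by
      have := hm; simp [List.length_drop] at this; omega
    have := hup (bisectGt arr i 0 arr.length arr.length + m) (by omega) hmlen
    rw [List.getD_eq_getElem _ _ hmlen] at this
    rw [List.getElem_drop] at hget
    simp only [decide_eq_true_eq]
    omega
  rw [h1, h2, List.nil_append]

theorem innerEq (fen : List (String × Int × Int)) (t : String) (v : Int) (i : Nat) :
    aFind fen t v (i + 1) fen.length =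
      bScan fen (typePositions fen t) (v + 3)
        (bisectGt (typePositions fen t) i 0 (typePositions fen t).length (typePositions fen t).length)
        (typePositions fen t).length := by
  rw [bScan_eq_find? fen (typePositions fen t) (v + 3) (typePositions fen t).length _ (by omega),
    drop_bisectGt_eq_filter _ _ (sorted_typePositions fen t), find?_filter']
  rw [show typePositions fen t =
      (List.range fen.length).filter (fun j => (fen.getD j ("", 0, 0)).1 == t) from rfl]
  rw [find?_filter', aFind_eq_find? fen t v fen.length (i + 1) (by omega)]
  rw [find?_drop_of_take (List.range fen.length)
      (fun x => ((fen.getD x ("", 0, 0)).1 == t) &&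
        (decide (i < x) && decide ((fen.getD x ("", 0, 0)).2.1 ≥ v + 3))) (i + 1)
      (fun x hx => by
        have := mem_take_range _ _ _ hx
        simp [decide_eq_false (show ¬ i < x by omega)])]
  apply find?_congr'
  intro x hx
  have hxi := mem_drop_range _ _ _ hx
  rw [decide_eq_true (show i < x by omega), Bool.true_and,
    decide_eq_decide.mpr (show ((fen.getD x ("", 0, 0)).2.1 - v + 1 ≥ 4) ↔
      ((fen.getD x ("", 0, 0)).2.1 ≥ v + 3) by omega)]

theorem loopEq (fen : List (String × Int × Int)) :
    ∀ (fuel : Nat) (i : Nat) (acc : List (String × Int × Int × Int × Int)),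
    aLoop fen i acc fuel = bLoop fen i acc fuel := by
  intro fuel
  induction fuel with
  | zero => intro i acc; rfl
  | succ fuel ih =>
    intro i acc
    rw [aLoop, bLoop]
    by_cases hlt : i + 1 < fen.length
    · rw [if_pos hlt, if_pos hlt]
      have harr : (if ((fen.getD i ("", 0, 0)).1 == "bottom") = true then typePositions fen "top"
          else typePositions fen "bottom") = typePositions fen
            (if (fen.getD i ("", 0, 0)).1 == "bottom" then "top" else "bottom") := by
        split <;> rfl
      rw [harr, ← innerEq]
      cases aFind fen (if (fen.getD i ("", 0, 0)).1 == "bottom" then "top" else "bottom")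
          (fen.getD i ("", 0, 0)).2.1 (i + 1) fen.length with
      | none => exact ih (i + 1) acc
      | some j => exact ih j _
    · rw [if_neg hlt, if_neg hlt]

-- ===== VERDICT (by name: the statement is the Claim_ definition above) =====
theorem build_bi_strict_spec : Claim_equal_build_bi_strict := by
  intro fen klist _
  unfold Spec_build_bi_strict build_bi_strict build_bi_strict_alt
  split
  · rfl
  · exact loopEq fen fen.length 0 []
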